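-- pv_equiv track=rewrite | github.com/ibrahim-abdon/IEEE-CS-Rookies-2024 | task1py/Smallest Pair.py | find_smallest_result
-- ===== SOURCE A (Python) =====
-- def find_smallest_result(n,list_numbers):
--     result =None
--     small_result =None
--     i=1
--     while i< n:
--         j =i+1
--         while j <=n:
--             a1=list_numbers[i-1]
--             a2=list_numbers[j-1]
--             result = a1+a2+j-i
--             if small_result == None or result <small_result :
--                 small_result = result
--             j += 1
--         i += 1
--     return small_result
-- ===== SOURCE B (Python) =====
-- def find_smallest_result(n, list_numbers):
--     # min over 1 <= i < j <= n of a[i-1] + a[j-1] + (j - i), computed in one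
--     # pass: the cost separates as (a[j-1] + j) + (a[i-1] - i), so it suffices
--     # to track the running minimum of a[p-1] - p over the prefix p < q.
--     if n < 2:
--         return None
--     best = None
--     m = list_numbers[0] - 1          # a[p-1] - p for p = 1
--     q = 2
--     while q <= n:
--         aq = list_numbers[q - 1]
--         cand = aq + q + m
--         if best is None or cand < best:
--             best = cand
--         d = aq - q
--         if d < m:
--             m = d
--         q += 1
--     return best
-- ===== Notes on version B (the rewrite author's own statement) =====
-- stated objective: faster
-- what changed: Replaces the O(n^2) double loop over all pairs by a single pass that exploits the separable cost a[i-1]+a[j-1]+j-i = (a[j-1]+j)+(a[i-1]-i), maintaining the running prefix minimum of a[p-1]-p.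
import Mathlib
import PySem

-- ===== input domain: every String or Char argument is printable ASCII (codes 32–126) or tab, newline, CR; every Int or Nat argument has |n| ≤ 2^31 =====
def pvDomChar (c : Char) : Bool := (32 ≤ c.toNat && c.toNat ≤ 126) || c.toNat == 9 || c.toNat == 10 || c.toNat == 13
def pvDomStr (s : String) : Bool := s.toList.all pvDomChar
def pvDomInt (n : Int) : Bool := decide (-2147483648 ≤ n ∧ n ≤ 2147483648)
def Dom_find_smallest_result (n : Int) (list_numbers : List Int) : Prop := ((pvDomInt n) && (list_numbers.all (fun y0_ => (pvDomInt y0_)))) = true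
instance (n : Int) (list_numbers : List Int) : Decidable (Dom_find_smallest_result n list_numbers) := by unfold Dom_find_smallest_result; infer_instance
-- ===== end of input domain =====

-- B replaces A's O(n^2) scan of all pairs by one O(n) pass using the separable
-- cost a[i-1]+a[j-1]+j-i = (a[j-1]+j) + (a[i-1]-i) and a running prefix minimum.

-- ===== PORT A =====
-- A's 'while i < n' / 'while j <= n' loops with unit increments become folds over
-- the ranges the counters traverse; list_numbers[i-1] / [j-1] are ported with
-- pyGetD (exact within Pre_, which puts every accessed index in range).
def find_smallest_result (n : Int) (list_numbers : List Int) : Option Int :=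
  (PySem.List.pyRange 1 n 1).foldl (fun small_result i =>
    (PySem.List.pyRange (i + 1) (n + 1) 1).foldl (fun small_result j =>
      let a1 := PySem.List.pyGetD list_numbers (i - 1) 0
      let a2 := PySem.List.pyGetD list_numbers (j - 1) 0
      let result := a1 + a2 + j - i
      match small_result with
      | none => some result
      | some s => if result < s then some result else some s) small_result) none

-- ===== PORT B =====
-- literal port of Source B: one pass with state (m, best); m is the running minimum
-- of a[p-1]-p over p < q, best the minimum cost seen so far.
def find_smallest_result_alt (n : Int) (list_numbers : List Int) : Option Int :=
  if n < 2 then none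
  else
    let m0 := PySem.List.pyGetD list_numbers 0 0 - 1
    let st := (PySem.List.pyRange 2 (n + 1) 1).foldl (fun (st : Int × Option Int) q =>
      let m := st.1
      let best := st.2
      let aq := PySem.List.pyGetD list_numbers (q - 1) 0
      let cand := aq + q + m
      let best' := match best with
        | none => some cand
        | some b => if cand < b then some cand else some b
      let d := aq - q
      let m' := if d < m then d else m
      (m', best')) (m0, none)
    st.2

-- ===== PRECONDITION & SPEC =====
-- Pre_ excludes exactly the inputs where Python A raises IndexError:
-- 2 ≤ n together with fewer than n list elements.
def Pre_find_smallest_result (n : Int) (list_numbers : List Int) : Prop :=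
  n < 2 ∨ n ≤ (list_numbers.length : Int)
instance (n : Int) (list_numbers : List Int) : Decidable (Pre_find_smallest_result n list_numbers) := by unfold Pre_find_smallest_result; infer_instance
def pvWitness_find_smallest_result : Int × List Int := (3, [4, 1, 7])

def Spec_find_smallest_result (n : Int) (list_numbers : List Int) (out : Option Int) : Prop := out = find_smallest_result_alt n list_numbers
instance (n : Int) (list_numbers : List Int) (out : Option Int) : Decidable (Spec_find_smallest_result n list_numbers out) := by unfold Spec_find_smallest_result; infer_instance

-- ===== CLAIM (what is proved, stated in full; the proofs are below) =====
def Claim_equal_find_smallest_result : Prop := ∀ (n : Int) (list_numbers : List Int), Dom_find_smallest_result n list_numbers → Pre_find_smallest_result n list_numbers → Spec_find_smallest_result n list_numbers (find_smallest_result n list_numbers)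

-- ===== LEMMAS AND PROOFS =====

-- option-valued minimum (none = "no value yet"), the semantics of A's and B's accumulators
def omin : Option Int → Option Int → Option Int
  | none, y => y
  | some a, none => some a
  | some a, some b => some (min a b)

lemma omin_none_right (x : Option Int) : omin x none = x := by cases x <;> rfl

lemma omin_assoc (a b c : Option Int) : omin (omin a b) c = omin a (omin b c) := by
  cases a <;> cases b <;> cases c <;> simp [omin, min_assoc]

lemma omin_comm (a b : Option Int) : omin a b = omin b a := by
  cases a <;> cases b <;> simp [omin, min_comm]

-- A's / B's update of the best-so-far IS omin with the candidate
lemma step_eq (s : Option Int) (v : Int) :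
    (match s with
     | none => some v
     | some b => if v < b then some v else some b) = omin s (some v) := by
  cases s with
  | none => rfl
  | some b => simp only [omin]; split_ifs with h <;> simp [min_def] <;> omega

-- fold of omin over a list of values
def mfold (l : List Int) : Option Int := l.foldl (fun s v => omin s (some v)) none

lemma mfold_hoist (l : List Int) (s : Option Int) :
    l.foldl (fun s v => omin s (some v)) s = omin s (mfold l) := by
  induction l generalizing s with
  | nil => simp [mfold, omin_none_right]
  | cons a l ih =>
      simp only [mfold, List.foldl_cons] at *
      rw [ih, ih (omin none (some a)), omin_assoc]
      rfl

lemma mfold_cons (a : Int) (l : List Int) : mfold (a :: l) = omin (some a) (mfold l) := by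
  simp only [mfold, List.foldl_cons]
  rw [mfold_hoist]
  rfl

lemma mfold_perm {l₁ l₂ : List Int} (h : l₁.Perm l₂) : mfold l₁ = mfold l₂ := by
  induction h with
  | nil => rfl
  | cons a _ ih => rw [mfold_cons, mfold_cons, ih]
  | swap a b l =>
      rw [mfold_cons, mfold_cons, mfold_cons, mfold_cons, ← omin_assoc, ← omin_assoc,
        omin_comm (some b) (some a)]
  | trans _ _ ih₁ ih₂ => rw [ih₁, ih₂]

lemma mfold_flatMap {α : Type} (l : List α) (g : α → List Int) :
    mfold (l.flatMap g) = l.foldl (fun s i => omin s (mfold (g i))) none := by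
  suffices h : ∀ s : Option Int,
      (l.flatMap g).foldl (fun s v => omin s (some v)) s
        = l.foldl (fun s i => omin s (mfold (g i))) s by
    exact h none
  induction l with
  | nil => intro s; rfl
  | cons a l ih =>
      intro s
      simp only [List.flatMap_cons, List.foldl_append, List.foldl_cons]
      rw [mfold_hoist (g a) s]
      exact ih _

-- the cost of the pair (i, j), and its separable pieces
def pairCost (L : List Int) (i j : Int) : Int :=
  PySem.List.pyGetD L (i - 1) 0 + PySem.List.pyGetD L (j - 1) 0 + j - i

def cF (L : List Int) (j : Int) : Int := PySem.List.pyGetD L (j - 1) 0 + j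
def dF (L : List Int) (i : Int) : Int := PySem.List.pyGetD L (i - 1) 0 - i

lemma pairCost_split (L : List Int) (i j : Int) : pairCost L i j = cF L j + dF L i := by
  simp [pairCost, cF, dF]; ring

-- prefix minimum of dF over p = 1, …, q-1 (as B maintains it)
def pmin (L : List Int) (q : Int) : Int :=
  (PySem.List.pyRange 2 q 1).foldl (fun m p => min m (dF L p)) (dF L 1)

lemma pmin_two (L : List Int) : pmin L 2 = dF L 1 := by
  simp [pmin, PySem.List.pyRange_one_eq_nil (by omega : (2:Int) ≤ 2)]

lemma pmin_succ (L : List Int) (q : Int) (hq : 2 ≤ q) :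
    pmin L (q + 1) = min (pmin L q) (dF L q) := by
  simp only [pmin]
  rw [PySem.List.pyRange_one_succ_right (by omega : (2:Int) ≤ q), List.foldl_append]
  rfl

-- A as the omin-fold over its row-major list of pair costs
lemma portA_eq (n : Int) (L : List Int) :
    find_smallest_result n L
      = mfold ((PySem.List.pyRange 1 n 1).flatMap
          (fun i => (PySem.List.pyRange (i + 1) (n + 1) 1).map (fun j => pairCost L i j))) := by
  rw [mfold_flatMap]
  unfold find_smallest_result
  apply PySem.List.foldl_congr_mem
  intro acc i _
  refine Eq.trans ?_ (mfold_hoist _ acc)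
  rw [List.foldl_map]
  apply PySem.List.foldl_congr_mem
  intro s j _
  exact step_eq s (pairCost L i j)

-- generic column fold: omin over (k + dF p) values is k + the running min of dF
lemma col_fold (L : List Int) (r : List Int) (k x : Int) :
    (r.map (fun p => k + dF L p)).foldl (fun s v => omin s (some v)) (some (k + x))
      = some (k + r.foldl (fun m p => min m (dF L p)) x) := by
  induction r generalizing x with
  | nil => rfl
  | cons a r ih =>
      simp only [List.map_cons, List.foldl_cons]
      have : omin (some (k + x)) (some (k + dF L a)) = some (k + min x (dF L a)) := by
        simp [omin, min_add_add_left]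
      rw [this, ih]

-- the minimum over column j (all pairs (i, j) with 1 ≤ i < j) in closed form
lemma col_min (L : List Int) (j : Int) (hj : 2 ≤ j) :
    mfold ((PySem.List.pyRange 1 j 1).map (fun i => pairCost L i j))
      = some (cF L j + pmin L j) := by
  rw [PySem.List.pyRange_one_cons (by omega : (1:Int) < j)]
  simp only [List.map_cons, mfold, List.foldl_cons]
  have h1 : ∀ i, pairCost L i j = cF L j + dF L i := fun i => pairCost_split L i j
  have : omin none (some (pairCost L 1 j)) = some (cF L j + dF L 1) := by
    rw [h1]; rfl
  rw [this]
  have hmap : (PySem.List.pyRange 2 j 1).map (fun i => pairCost L i j)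
      = (PySem.List.pyRange 2 j 1).map (fun p => cF L j + dF L p) := by
    apply List.map_congr_left; intro p _; exact h1 p
  rw [show (1:Int) + 1 = 2 from by norm_num] at *
  rw [hmap, col_fold]
  rfl

-- B's loop invariant: starting at column q with m = pmin q, the second component
-- is best ⊓ (omin over the remaining column minima)
lemma portB_loop (n : Int) (L : List Int) :
    ∀ (k : Nat) (q : Int), 2 ≤ q → (n + 1 - q).toNat = k → ∀ (best : Option Int),
    ((PySem.List.pyRange q (n + 1) 1).foldl (fun (st : Int × Option Int) q =>
      let m := st.1
      let best := st.2
      let aq := PySem.List.pyGetD L (q - 1) 0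
      let cand := aq + q + m
      let best' := match best with
        | none => some cand
        | some b => if cand < b then some cand else some b
      let d := aq - q
      let m' := if d < m then d else m
      (m', best')) (pmin L q, best)).2
      = omin best (mfold ((PySem.List.pyRange q (n + 1) 1).map (fun j => cF L j + pmin L j))) := by
  intro k
  induction k with
  | zero =>
      intro q _ hk best
      rw [PySem.List.pyRange_one_eq_nil (by omega : n + 1 ≤ q)]
      simp [mfold, omin_none_right]
  | succ k ih =>
      intro q hq hk best
      rw [PySem.List.pyRange_one_cons (by omega : q < n + 1)]
      simp only [List.foldl_cons, List.map_cons]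
      have hm' : (if PySem.List.pyGetD L (q - 1) 0 - q < pmin L q
          then PySem.List.pyGetD L (q - 1) 0 - q else pmin L q) = pmin L (q + 1) := by
        rw [pmin_succ L q hq, min_def, dF]
        split_ifs <;> first | rfl | omega
      have hcand : PySem.List.pyGetD L (q - 1) 0 + q + pmin L q = cF L q + pmin L q := by
        simp [cF]
      rw [mfold_cons]
      simp only [hm', hcand]
      rw [step_eq best (cF L q + pmin L q),
        ih (q + 1) (by omega) (by omega) (omin best (some (cF L q + pmin L q))), omin_assoc]

-- B as the omin-fold over the list of column minima (for n ≥ 2)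
lemma portB_eq (n : Int) (L : List Int) (hn : 2 ≤ n) :
    find_smallest_result_alt n L
      = mfold ((PySem.List.pyRange 2 (n + 1) 1).map (fun j => cF L j + pmin L j)) := by
  unfold find_smallest_result_alt
  rw [if_neg (by omega)]
  have h0 : PySem.List.pyGetD L 0 0 - 1 = pmin L 2 := by
    rw [pmin_two]; simp [dF]
  simp only [h0]
  rw [portB_loop n L (n + 1 - 2).toNat 2 (by omega) rfl none]
  rfl

-- the row-major and column-major enumerations of the pairs 1 ≤ i < j ≤ n are permutations
lemma pairs_perm (n : Int) :
    ((PySem.List.pyRange 1 n 1).flatMap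
        (fun i => (PySem.List.pyRange (i + 1) (n + 1) 1).map (fun j => (i, j)))).Perm
      ((PySem.List.pyRange 2 (n + 1) 1).flatMap
        (fun j => (PySem.List.pyRange 1 j 1).map (fun i => (i, j)))) := by
  rw [List.perm_ext_iff_of_nodup]
  · intro p
    simp only [List.mem_flatMap, List.mem_map, PySem.List.mem_pyRange_one]
    constructor
    · rintro ⟨i, hi, j, hj, rfl⟩
      exact ⟨j, by omega, i, by omega, rfl⟩
    · rintro ⟨j, hj, i, hi, rfl⟩
      exact ⟨i, by omega, j, by omega, rfl⟩
  · rw [List.nodup_flatMap]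
    refine ⟨fun i _ => ?_, ?_⟩
    · exact (PySem.List.nodup_pyRange_one _ _).map (fun a b h => by
        simpa using congrArg Prod.snd h)
    · refine (PySem.List.nodup_pyRange_one _ _).pairwise_of_forall_ne ?_
      intro a _ b _ hab
      simp only [Function.onFun, List.disjoint_left, List.mem_map]
      rintro p ⟨j, _, rfl⟩ ⟨j', _, h⟩
      exact hab (by simpa using (congrArg Prod.fst h).symm)
  · rw [List.nodup_flatMap]
    refine ⟨fun j _ => ?_, ?_⟩
    · exact (PySem.List.nodup_pyRange_one _ _).map (fun a b h => by
        simpa using congrArg Prod.fst h)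
    · refine (PySem.List.nodup_pyRange_one _ _).pairwise_of_forall_ne ?_
      intro a _ b _ hab
      simp only [Function.onFun, List.disjoint_left, List.mem_map]
      rintro p ⟨i, _, rfl⟩ ⟨i', _, h⟩
      exact hab (by simpa using (congrArg Prod.snd h).symm)

-- hence the two omin-folds over all pair costs agree
lemma rows_eq_cols (n : Int) (L : List Int) :
    mfold ((PySem.List.pyRange 1 n 1).flatMap
        (fun i => (PySem.List.pyRange (i + 1) (n + 1) 1).map (fun j => pairCost L i j)))
      = mfold ((PySem.List.pyRange 2 (n + 1) 1).flatMap
        (fun j => (PySem.List.pyRange 1 j 1).map (fun i => pairCost L i j))) := by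
  have h := (pairs_perm n).map (fun p : Int × Int => pairCost L p.1 p.2)
  have := mfold_perm h
  simpa only [List.map_flatMap, List.map_map, Function.comp_def] using this

-- ===== VERDICT (by name: the statement is the Claim_ definition above) =====
theorem find_smallest_result_spec : Claim_equal_find_smallest_result := by
  intro n L _ _
  unfold Spec_find_smallest_result
  by_cases hn : n < 2
  · have hA : find_smallest_result n L = none := by
      rw [portA_eq, PySem.List.pyRange_one_eq_nil (by omega : n ≤ 1)]
      rfl
    have hB : find_smallest_result_alt n L = none := by
      unfold find_smallest_result_alt
      rw [if_pos hn]
    rw [hA, hB]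
  · rw [portA_eq, portB_eq n L (by omega), rows_eq_cols]
    rw [mfold_flatMap, mfold, List.foldl_map]
    apply PySem.List.foldl_congr_mem
    intro s j hj
    rw [col_min L j (by rw [PySem.List.mem_pyRange_one] at hj; omega)]
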